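-- pv_equiv track=rewrite | github.com/kamranhasan/indirect-prompt-injection-poc | app.py | _detect_injection
-- ===== SOURCE A (Python) =====
-- def _detect_injection(content):
--     """
--     Detect common injection patterns
--     """
--     injection_patterns = [
--         'SYSTEM INSTRUCTION',
--         'IGNORE PREVIOUS',
--         'NEW INSTRUCTION',
--         'OVERRIDE',
--         'CRITICAL INSTRUCTION TO AI',
--         '[SYSTEM]',
--         'IMPORTANT INSTRUCTION FOR AI'
--     ]
--
--     for pattern in injection_patterns:
--         if pattern.lower() in content.lower():
--             return True
--     return False
-- ===== SOURCE B (Python) =====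
-- def _detect_injection(content):
--     """
--     Detect common injection patterns
--     """
--     phrases = [
--         'system instruction',
--         'ignore previous',
--         'new instruction',
--         'override',
--         'critical instruction to ai',
--         '[system]',
--         'important instruction for ai',
--     ]
--     text = content.lower()
--     return any(
--         any(text.startswith(p, i) for p in phrases)
--         for i in range(len(text) + 1)
--     )
-- ===== Notes on version B (the rewrite author's own statement) =====
-- stated objective: alternative
-- what changed: Instead of running seven separate full lowered-substring scans, one per pattern, B lowers the text once and makes a single left-to-right pass, testing at each position whether any phrase starts there.
import Mathlib
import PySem

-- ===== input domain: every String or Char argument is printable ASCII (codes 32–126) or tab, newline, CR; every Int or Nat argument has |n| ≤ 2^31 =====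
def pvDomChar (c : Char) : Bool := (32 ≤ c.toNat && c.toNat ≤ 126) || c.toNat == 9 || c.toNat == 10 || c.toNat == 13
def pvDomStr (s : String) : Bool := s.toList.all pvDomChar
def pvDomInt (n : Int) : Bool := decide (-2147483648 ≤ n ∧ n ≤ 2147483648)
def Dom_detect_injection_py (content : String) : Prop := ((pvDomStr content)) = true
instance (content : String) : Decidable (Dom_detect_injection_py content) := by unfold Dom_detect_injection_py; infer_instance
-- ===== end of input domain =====

-- B replaces A's seven separate lowered-substring scans by one left-to-right pass over the
-- lowered text, checking at each position whether any phrase starts there (alternative algorithm).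

-- ===== PORT A =====
def detect_injection_py (content : String) : Bool :=
  let injection_patterns : List String :=
    ["SYSTEM INSTRUCTION", "IGNORE PREVIOUS", "NEW INSTRUCTION", "OVERRIDE",
     "CRITICAL INSTRUCTION TO AI", "[SYSTEM]", "IMPORTANT INSTRUCTION FOR AI"]
  -- for pattern in …: if pattern.lower() in content.lower(): return True / return False
  injection_patterns.any (fun pattern =>
    PySem.Str.isIn (PySem.Str.lower pattern) (PySem.Str.lower content))

-- ===== PORT B =====
-- the lowercase phrase list of Source B
def pvPhrases : List (List Char) :=
  ["system instruction".toList, "ignore previous".toList, "new instruction".toList,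
   "override".toList, "critical instruction to ai".toList, "[system]".toList,
   "important instruction for ai".toList]

-- the position loop of Source B: for i in range(len(text)+1): any(text.startswith(p, i) …)
-- (startswith(p, i) on the suffix at position i = isPrefixOf on the i-th suffix)
def pvScan (cs : List Char) : Bool :=
  match cs with
  | [] => pvPhrases.any (fun p => p.isPrefixOf ([] : List Char))
  | c :: rest => pvPhrases.any (fun p => p.isPrefixOf (c :: rest)) || pvScan rest

def detect_injection_py_alt (content : String) : Bool :=
  pvScan (PySem.Str.lower content).toList

-- ===== PRECONDITION & SPEC =====
def Spec_detect_injection_py (content : String) (out : Bool) : Prop := out = detect_injection_py_alt content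
instance (content : String) (out : Bool) : Decidable (Spec_detect_injection_py content out) := by unfold Spec_detect_injection_py; infer_instance

-- ===== CLAIM (what is proved, stated in full; the proofs are below) =====
def Claim_equal_detect_injection_py : Prop := ∀ (content : String), Dom_detect_injection_py content → Spec_detect_injection_py content (detect_injection_py content)

-- ===== LEMMAS AND PROOFS =====

-- B's scan finds exactly the phrases occurring as an infix of the lowered text
theorem pvScan_iff (cs : List Char) :
    pvScan cs = true ↔ ∃ p ∈ pvPhrases, p <:+: cs := by
  induction cs with
  | nil =>
    simp [pvScan, List.any_eq_true, List.isPrefixOf_iff_prefix, List.prefix_nil,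
      List.infix_nil]
  | cons c rest ih =>
    simp only [pvScan, Bool.or_eq_true, ih, List.any_eq_true,
      List.isPrefixOf_iff_prefix]
    constructor
    · rintro (⟨p, hp, h⟩ | ⟨p, hp, h⟩)
      · exact ⟨p, hp, h.isInfix⟩
      · exact ⟨p, hp, h.trans ((List.suffix_cons c rest).isInfix)⟩
    · rintro ⟨p, hp, h⟩
      rcases (List.infix_cons_iff).mp h with h' | h'
      · exact Or.inl ⟨p, hp, h'⟩
      · exact Or.inr ⟨p, hp, h'⟩

-- A's lowered patterns are precisely B's phrase list
theorem pvLowered_patterns :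
    (["SYSTEM INSTRUCTION", "IGNORE PREVIOUS", "NEW INSTRUCTION", "OVERRIDE",
      "CRITICAL INSTRUCTION TO AI", "[SYSTEM]", "IMPORTANT INSTRUCTION FOR AI"].map
      (fun p => (PySem.Str.lower p).toList)) = pvPhrases := by decide

-- ===== VERDICT (by name: the statement is the Claim_ definition above) =====
theorem detect_injection_py_spec : Claim_equal_detect_injection_py := by
  intro content _
  show detect_injection_py content = detect_injection_py_alt content
  rw [Bool.eq_iff_iff]
  unfold detect_injection_py detect_injection_py_alt
  rw [pvScan_iff]
  simp only [List.any_eq_true, PySem.Str.isIn_iff_infix]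
  constructor
  · rintro ⟨p, hp, h⟩
    refine ⟨(PySem.Str.lower p).toList, ?_, h⟩
    rw [← pvLowered_patterns]
    exact List.mem_map_of_mem hp
  · rintro ⟨q, hq, h⟩
    rw [← pvLowered_patterns] at hq
    obtain ⟨p, hp, rfl⟩ := List.mem_map.mp hq
    exact ⟨p, hp, h⟩
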